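-- pv_equiv track=rewrite | github.com/IsaacOrmeno/AMIN-T3 | Tarea_Programacion_3.py | create_initial_solution
-- ===== SOURCE A (Python) =====
-- def create_initial_solution(capacity, weights, costs): #se crea una solucion inicial
--     cost = 0 #se inicializa la variable que guardara el costo total de la solucion
--     weight = 0 #se inicializa la variable que guardara el peso total de la mochila
--     weights_costs = list() #se crea una lista que albergará los elementos de la mochila del tipo  (peso, valor)
--     pesos = weights.copy() #se crea una copia de la lista  que es copia de la lista que alberga los pesos
--     costos = costs.copy() #se crea una lista que es copia de la lista que albrca los calores de los elementos de la mochila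
--     while pesos:  #mientras pesos no este vacia
--         min_value = min(pesos) #encontramos el menor peso
--         min_index = pesos.index(min_value) #se almacena el indice del menor peso encontrado
--         if weight+min_value <= capacity:  #si la suma de los pesos mas el menor peso actual es menor que la capacidad de la mochila
--             weight += min_value #se suma el minimo peso actual encontrado a la suma general de pesos
--             cost += costos[min_index] #se suma el valor del minimo elemento encontrado
--             weights_costs.append((pesos[min_index], costos[min_index])) #se añade el elemento en la forma (peso, valor) a la lista de los elementos en la mochila
--         pesos.pop(min_index) #se elimina el minimo peso encontrado en esta iteracion de la lista copia de los pesos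
--         costos.pop(min_index) #se elimina el valor del minimo pesos encontrado en esta iteracion de la lista copia de los valores
--     return weights_costs, cost #se retorna la "mochila" con los elementos (peso,valor) en ella y el valor obtenido por esta solucion
-- ===== SOURCE B (Python) =====
-- def create_initial_solution(capacity, weights, costs):
--     # Sort (weight, original index) pairs once; ties broken by lowest original
--     # index, which is exactly the order repeated min()+index() extraction visits.
--     order = sorted((w, i) for i, w in enumerate(weights))
--     result = []
--     cost = 0
--     weight = 0
--     for w, i in order:
--         if weight + w <= capacity:
--             weight += w
--             cost += costs[i]
--             result.append((w, costs[i]))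
--     return result, cost
-- ===== Notes on version B (the rewrite author's own statement) =====
-- stated objective: faster
-- what changed: Replaces the quadratic repeated min()/index()/pop() extraction over mutable copies with a single stable sort of (weight, original index) pairs followed by one linear greedy pass indexing costs by the original index.
import Mathlib
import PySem

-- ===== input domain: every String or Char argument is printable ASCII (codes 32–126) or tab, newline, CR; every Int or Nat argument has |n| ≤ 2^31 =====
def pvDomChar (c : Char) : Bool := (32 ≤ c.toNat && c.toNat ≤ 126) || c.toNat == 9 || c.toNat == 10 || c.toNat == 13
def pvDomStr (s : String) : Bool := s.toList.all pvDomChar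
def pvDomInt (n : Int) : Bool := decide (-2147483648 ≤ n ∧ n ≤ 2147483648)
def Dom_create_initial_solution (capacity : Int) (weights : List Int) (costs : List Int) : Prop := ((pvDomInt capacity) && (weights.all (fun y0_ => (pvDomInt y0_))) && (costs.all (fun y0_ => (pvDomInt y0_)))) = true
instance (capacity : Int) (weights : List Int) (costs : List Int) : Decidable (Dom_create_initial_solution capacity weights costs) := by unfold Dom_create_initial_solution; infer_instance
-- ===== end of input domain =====

-- B replaces A's quadratic repeated min/index/pop extraction with one sort of
-- (weight, original index) pairs and a single greedy pass (A mutates only its own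
-- copies, so the equivalence is about the full observable behaviour).

-- ===== PORT A =====
-- the while-loop of A: state (pesos, costos, weight, cost, weights_costs)
def create_initial_solution_go (capacity : Int) (pesos costos : List Int)
    (weight cost : Int) (weights_costs : List (Int × Int)) : (List (Int × Int)) × Int :=
  match PySem.List.min? pesos (fun x => x) with
  | none => (weights_costs, cost)                     -- pesos empty: the while-loop exits
  | some min_value =>
    match PySem.List.index? pesos min_value with
    | none => (weights_costs, cost)                   -- unreachable: the min is a member
    | some min_index =>
      match hp : PySem.List.pop? pesos (min_index : Int) with
      | none => (weights_costs, cost)                 -- unreachable: min_index < |pesos|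
      | some pr =>
        -- costos[min_index] and costos.pop(min_index); Python raises IndexError when
        -- min_index is out of range for costos, which happens iff |weights| > |costs|
        -- (excluded by Pre_); there the port uses defaults instead.
        let cval := PySem.List.pyGetD costos (min_index : Int) 0
        let costos' := ((PySem.List.pop? costos (min_index : Int)).map Prod.snd).getD []
        if weight + min_value ≤ capacity then
          create_initial_solution_go capacity pr.2 costos' (weight + min_value) (cost + cval)
            (weights_costs ++ [(pr.1, cval)])
        else
          create_initial_solution_go capacity pr.2 costos' weight cost weights_costs
  termination_by pesos.length
  decreasing_by
    all_goals (have := PySem.List.length_of_pop?_eq_some pesos hp; omega)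

def create_initial_solution (capacity : Int) (weights : List Int) (costs : List Int) : (List (Int × Int)) × Int :=
  create_initial_solution_go capacity weights costs 0 0 []

-- ===== PORT B =====
-- the body of B's for-loop; state (result, cost, weight)
def pyBStep (capacity : Int) (costs : List Int)
    (st : (List (Int × Int)) × Int × Int) (p : Int × Int) : (List (Int × Int)) × Int × Int :=
  if st.2.2 + p.1 ≤ capacity then
    (st.1 ++ [(p.1, PySem.List.pyGetD costs p.2 0)],
     st.2.1 + PySem.List.pyGetD costs p.2 0, st.2.2 + p.1)
  else st

def create_initial_solution_alt (capacity : Int) (weights : List Int) (costs : List Int) : (List (Int × Int)) × Int :=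
  -- order = sorted((w, i) for i, w in enumerate(weights)): Python tuple-key sort
  let order := PySem.List.sorted2 ((PySem.List.enumerate weights).map (fun p => (p.2, p.1)))
      (fun q => q.1) (fun q => q.2)
  let st := order.foldl (pyBStep capacity costs) ([], 0, 0)
  (st.1, st.2.1)

-- ===== PRECONDITION & SPEC =====
-- When |weights| > |costs| the Python A ALWAYS raises IndexError (popping both lists in
-- step, costos runs out while pesos is still nonempty); Pre_ excludes exactly those inputs.
def Pre_create_initial_solution (capacity : Int) (weights : List Int) (costs : List Int) : Prop :=
  weights.length ≤ costs.length
instance (capacity : Int) (weights : List Int) (costs : List Int) : Decidable (Pre_create_initial_solution capacity weights costs) := by unfold Pre_create_initial_solution; infer_instance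

def pvWitness_create_initial_solution : Int × List Int × List Int := (5, [2, 1, 2], [3, 4, 1])

def Spec_create_initial_solution (capacity : Int) (weights : List Int) (costs : List Int) (out : (List (Int × Int)) × Int) : Prop := out = create_initial_solution_alt capacity weights costs
instance (capacity : Int) (weights : List Int) (costs : List Int) (out : (List (Int × Int)) × Int) : Decidable (Spec_create_initial_solution capacity weights costs out) := by unfold Spec_create_initial_solution; infer_instance

-- ===== CLAIM (what is proved, stated in full; the proofs are below) =====
def Claim_equal_create_initial_solution : Prop := ∀ (capacity : Int) (weights : List Int) (costs : List Int), Dom_create_initial_solution capacity weights costs → Pre_create_initial_solution capacity weights costs → Spec_create_initial_solution capacity weights costs (create_initial_solution capacity weights costs)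

-- ===== LEMMAS AND PROOFS =====

-- B's tuple-key sort is the sort under the lexicographic order on pairs
theorem sorted2_eq_sorted_lex (u : List (Int × Int)) :
    PySem.List.sorted2 u (fun q => q.1) (fun q => q.2) =
      PySem.List.sorted u (fun q => toLex q) := by
  unfold PySem.List.sorted2 PySem.List.sorted
  simp only [if_neg (by decide : ¬ (false = true))]
  congr 1
  funext a b
  congr 1
  funext x y
  have : decide (toLex x < toLex y) = decide (x.1 < y.1 ∨ x.1 = y.1 ∧ x.2 < y.2) := by
    simp [Prod.Lex.toLex_lt_toLex]
  rw [this]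
  by_cases h1 : x.1 < y.1 <;> by_cases h2 : y.1 < x.1 <;> by_cases h3 : x.2 < y.2 <;>
    simp [h1, h2, h3] <;> omega

-- extracting the minimum weight at its first index (A's min + .index) takes exactly the
-- head of the lexicographic sort, provided the second components are strictly increasing
theorem sorted_min_cons (u : List (Int × Int)) (mv : Int) (i : Nat)
    (hpw : u.Pairwise (fun a b => a.2 < b.2))
    (hm : PySem.List.min? (u.map (fun q => q.1)) (fun x => x) = some mv)
    (hi : PySem.List.index? (u.map (fun q => q.1)) mv = some i) :
    ∃ _h : i < u.length,
      PySem.List.sorted u (fun q => toLex q) =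
        u[i] :: PySem.List.sorted (u.eraseIdx i) (fun q => toLex q) := by
  obtain ⟨hk, hval, hfirst⟩ := PySem.List.getElem_of_index?_eq_some hi
  rw [List.length_map] at hk
  have hui : u[i].1 = mv := by simpa using hval
  refine ⟨hk, ?_⟩
  have hmin : ∀ y ∈ u, mv ≤ y.1 := by
    intro y hy
    simpa using PySem.List.min?_isMin hm y.1 (List.mem_map_of_mem hy)
  have hidx : ∀ j (hj : j < u.length), u[j].1 = mv → i ≤ j := by
    intro j hj hjv
    by_contra hcon
    exact hfirst j (by omega) (by simpa using hjv)
  have hhead : ∀ y ∈ u.eraseIdx i, toLex u[i] < toLex y := by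
    intro y hy
    obtain ⟨j', hj', hyj⟩ := List.mem_iff_getElem.mp hy
    have hel : (u.eraseIdx i).length = u.length - 1 := List.length_eraseIdx_of_lt hk
    by_cases hlt : j' < i
    · have hju : j' < u.length := by omega
      have he : (u.eraseIdx i)[j'] = u[j'] := List.getElem_eraseIdx_of_lt hj' hlt
      have h1 : mv ≤ u[j'].1 := hmin _ (List.getElem_mem _)
      have h2 : ¬ (u[j'].1 = mv) := fun hEq => absurd (hidx j' hju hEq) (by omega)
      rw [Prod.Lex.toLex_lt_toLex]
      left
      rw [← hyj, he, hui]
      omega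
    · have hj2 : j' + 1 < u.length := by omega
      have he : (u.eraseIdx i)[j'] = u[j'+1] := List.getElem_eraseIdx_of_ge hj' (by omega)
      have h1 : mv ≤ (u[j'+1]'hj2).1 := hmin _ (List.getElem_mem _)
      rw [Prod.Lex.toLex_lt_toLex, ← hyj, he]
      by_cases hEq : (u[j'+1]'hj2).1 = mv
      · exact Or.inr ⟨by omega, (List.pairwise_iff_getElem.mp hpw) i (j'+1) hk hj2 (by omega)⟩
      · exact Or.inl (by omega)
  have hsub := hpw.sublist (List.eraseIdx_sublist u i)
  have hne : (u.eraseIdx i).Pairwise (fun a b => toLex a ≠ toLex b) := by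
    refine hsub.imp ?_
    intro a b h hEq
    have hab : a = b := by simpa using hEq
    subst hab
    exact lt_irrefl _ h
  have hsne : (PySem.List.sorted (u.eraseIdx i) (fun q => toLex q)).Pairwise
      (fun a b => toLex a ≠ toLex b) := by
    refine (List.Perm.pairwise_iff ?_ (PySem.List.sorted_perm (u.eraseIdx i) (fun q => toLex q) false)).mpr hne
    intro a b h hEq
    exact h hEq.symm
  have htail := (PySem.List.sorted_pairwise (u.eraseIdx i) (fun q => toLex q)).and hsne
  refine PySem.List.sorted_eq_of_perm_of_pairwise_lt _ _ _ ?_ ?_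
  · exact ((PySem.List.sorted_perm (u.eraseIdx i) (fun q => toLex q) false).cons u[i]).trans
      (List.getElem_cons_eraseIdx_perm hk)
  · refine List.pairwise_cons.mpr ⟨?_, htail.imp (fun h => lt_of_le_of_ne h.1 h.2)⟩
    intro y hy
    exact hhead y ((PySem.List.mem_sorted _ _ _ _).mp hy)

-- the bridge: A's extraction loop over triples (weight, original index, cost) is
-- B's fold over the lexicographically sorted (weight, index) pairs
theorem go_eq_fold (capacity : Int) (costs : List Int) :
    ∀ (n : Nat) (t : List (Int × Int × Int)) (rest : List Int) (w c : Int) (acc : List (Int × Int)),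
      t.length = n →
      t.Pairwise (fun a b => a.2.1 < b.2.1) →
      (∀ x ∈ t, PySem.List.pyGetD costs x.2.1 0 = x.2.2) →
      create_initial_solution_go capacity (t.map (fun x => x.1)) (t.map (fun x => x.2.2) ++ rest) w c acc =
        ((((PySem.List.sorted (t.map (fun x => (x.1, x.2.1))) (fun q => toLex q)).foldl
            (pyBStep capacity costs) (acc, c, w)).1),
         (((PySem.List.sorted (t.map (fun x => (x.1, x.2.1))) (fun q => toLex q)).foldl
            (pyBStep capacity costs) (acc, c, w)).2.1)) := by
  intro n
  induction n with
  | zero =>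
    intro t rest w c acc hlen hpw hinv
    have ht : t = [] := List.length_eq_zero_iff.mp hlen
    subst ht
    rw [create_initial_solution_go]
    rfl
  | succ n ih =>
    intro t rest w c acc hlen hpw hinv
    have ht : t ≠ [] := by intro h; subst h; simp at hlen
    have hpsne : t.map (fun x => x.1) ≠ [] := by simpa using ht
    obtain ⟨mv, hm⟩ : ∃ mv, PySem.List.min? (t.map (fun x => x.1)) (fun x => x) = some mv := by
      cases hmm : PySem.List.min? (t.map (fun x => x.1)) (fun x => x) with
      | none => exact absurd ((PySem.List.min?_eq_none_iff _ _).mp hmm) hpsne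
      | some v => exact ⟨v, rfl⟩
    have hmem : mv ∈ t.map (fun x => x.1) := PySem.List.min?_mem hm
    obtain ⟨i, hi⟩ : ∃ i, PySem.List.index? (t.map (fun x => x.1)) mv = some i := by
      have hs := (PySem.List.index?_isSome_iff (t.map (fun x => x.1)) mv).mpr hmem
      cases h : PySem.List.index? (t.map (fun x => x.1)) mv with
      | none => rw [h] at hs; simp at hs
      | some j => exact ⟨j, rfl⟩
    obtain ⟨hk0, hval, _⟩ := PySem.List.getElem_of_index?_eq_some hi
    have hk : i < t.length := by simpa using hk0
    have hpop : PySem.List.pop? (t.map (fun x => x.1)) (i : Int) =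
        some ((t.map (fun x => x.1))[i], (t.map (fun x => x.1)).eraseIdx i) :=
      PySem.List.pop?_natCast _ i hk0
    have hkc : i < (t.map (fun x => x.2.2) ++ rest).length := by simp; omega
    have hcv : PySem.List.pyGetD (t.map (fun x => x.2.2) ++ rest) (i : Int) 0 = t[i].2.2 := by
      rw [PySem.List.pyGetD_natCast, List.getD_append _ _ _ _ (by simpa using hk),
        List.getD_eq_getElem _ _ (by simpa using hk)]
      simp
    have hpopc : ((PySem.List.pop? (t.map (fun x => x.2.2) ++ rest) (i : Int)).map Prod.snd).getD [] =
        (t.eraseIdx i).map (fun x => x.2.2) ++ rest := by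
      rw [PySem.List.pop?_natCast _ i hkc]
      simp only [Option.map_some, Option.getD_some]
      rw [List.eraseIdx_append_of_lt_length (by simpa using hk) rest, List.eraseIdx_map]
    -- B side
    have hpwu : (t.map (fun x => (x.1, x.2.1))).Pairwise (fun a b => a.2 < b.2) := by
      rw [List.pairwise_map]
      exact hpw
    have humap : (t.map (fun x => (x.1, x.2.1))).map (fun q => q.1) = t.map (fun x => x.1) := by
      simp [List.map_map]
    obtain ⟨hiu, hsort⟩ := sorted_min_cons (t.map (fun x => (x.1, x.2.1))) mv i hpwu
      (by rw [humap]; exact hm) (by rw [humap]; exact hi)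
    have hgu : (t.map (fun x => (x.1, x.2.1)))[i] = (t[i].1, t[i].2.1) := by
      simp
    have heu : (t.map (fun x => (x.1, x.2.1))).eraseIdx i = (t.eraseIdx i).map (fun x => (x.1, x.2.1)) := by
      simp [List.eraseIdx_map]
    have hti1 : t[i].1 = mv := by simpa using hval
    have hinv_i : PySem.List.pyGetD costs t[i].2.1 0 = t[i].2.2 := hinv _ (List.getElem_mem _)
    -- invariants for the recursive call
    have hlen' : (t.eraseIdx i).length = n := by
      rw [List.length_eraseIdx_of_lt hk]; omega
    have hpw' := hpw.sublist (List.eraseIdx_sublist t i)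
    have hinv' : ∀ x ∈ t.eraseIdx i, PySem.List.pyGetD costs x.2.1 0 = x.2.2 :=
      fun x hx => hinv x ((List.eraseIdx_sublist t i).mem hx)
    have hps' : (t.map (fun x => x.1)).eraseIdx i = (t.eraseIdx i).map (fun x => x.1) := by
      simp [List.eraseIdx_map]
    -- unfold one step of A
    rw [create_initial_solution_go]
    simp only [hm, hi]
    split
    · next heq => rw [hpop] at heq; cases heq
    · next pr heq =>
      have hpr : pr = ((t.map (fun x => x.1))[i], (t.map (fun x => x.1)).eraseIdx i) := by
        rw [hpop] at heq; exact (Option.some.inj heq).symm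
      subst hpr
      have hget1 : (t.map (fun x => x.1))[i] = t[i].1 := by simp
      have hstep : pyBStep capacity costs (acc, c, w) (t[i].1, t[i].2.1) =
          if w + mv ≤ capacity then
            (acc ++ [(t[i].1, t[i].2.2)], c + t[i].2.2, w + mv)
          else (acc, c, w) := by
        simp [pyBStep, hinv_i, hti1]
      simp only [hcv, hpopc, hps', hget1]
      -- unfold one step of B
      rw [hsort, List.foldl_cons, hgu, heu, hstep]
      by_cases hcap : w + mv ≤ capacity
      · rw [if_pos hcap, if_pos hcap]
        exact ih (t.eraseIdx i) rest (w + mv) (c + t[i].2.2) (acc ++ [(t[i].1, t[i].2.2)]) hlen' hpw' hinv'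
      · rw [if_neg hcap, if_neg hcap]
        exact ih (t.eraseIdx i) rest w c acc hlen' hpw' hinv'

-- ===== VERDICT (by name: the statement is the Claim_ definition above) =====
theorem create_initial_solution_spec : Claim_equal_create_initial_solution := by
  intro capacity weights costs _hdom hpre
  unfold Pre_create_initial_solution at hpre
  unfold Spec_create_initial_solution
  have h1 : ((PySem.List.enumerate weights).map (fun p => (p.2, p.1, PySem.List.pyGetD costs p.1 0))).map (fun x => x.1) = weights := by
    simp [List.map_map, Function.comp_def, PySem.List.map_snd_enumerate]
  have h2 : ((PySem.List.enumerate weights).map (fun p => (p.2, p.1, PySem.List.pyGetD costs p.1 0))).map (fun x => x.2.2) = costs.take weights.length := by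
    apply List.ext_getElem
    · simp [PySem.List.length_enumerate]; omega
    · intro j hj1 hj2
      have hjw : j < weights.length := by simpa [PySem.List.length_enumerate] using hj1
      have hjc : j < costs.length := by omega
      simp [PySem.List.getElem_enumerate, List.getElem_take]
      simp [List.getElem?_eq_getElem hjc]
  have h3 : costs = ((PySem.List.enumerate weights).map (fun p => (p.2, p.1, PySem.List.pyGetD costs p.1 0))).map (fun x => x.2.2) ++ costs.drop weights.length := by
    rw [h2, List.take_append_drop]
  have h4 : ((PySem.List.enumerate weights).map (fun p => (p.2, p.1, PySem.List.pyGetD costs p.1 0))).Pairwise (fun a b => a.2.1 < b.2.1) := by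
    rw [List.pairwise_map]
    exact PySem.List.pairwise_lt_enumerate weights 0
  have h5 : ∀ x ∈ (PySem.List.enumerate weights).map (fun p => (p.2, p.1, PySem.List.pyGetD costs p.1 0)),
      PySem.List.pyGetD costs x.2.1 0 = x.2.2 := by
    intro x hx
    obtain ⟨p, _, rfl⟩ := List.mem_map.mp hx
    rfl
  have h6 : ((PySem.List.enumerate weights).map (fun p => (p.2, p.1, PySem.List.pyGetD costs p.1 0))).map (fun x => (x.1, x.2.1)) = (PySem.List.enumerate weights).map (fun p => (p.2, p.1)) := by
    simp [List.map_map, Function.comp_def]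
  have hmain := go_eq_fold capacity costs ((PySem.List.enumerate weights).map (fun p => (p.2, p.1, PySem.List.pyGetD costs p.1 0))).length
    ((PySem.List.enumerate weights).map (fun p => (p.2, p.1, PySem.List.pyGetD costs p.1 0)))
    (costs.drop weights.length) 0 0 [] rfl h4 h5
  rw [h1, ← h3, h6] at hmain
  unfold create_initial_solution create_initial_solution_alt
  rw [hmain, sorted2_eq_sorted_lex]
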